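-- pv_equiv track=rewrite | github.com/vargasraquel/exercicios-olabi | processamento_dados.py | calcular_total_funcionarios
-- ===== SOURCE A (Python) =====
-- def calcular_total_funcionarios(dados, ano):
--     dados_sem_cabecalho = dados[1:]
--
--     total_funcionarios = {
--         'race_asian': 0,
--         'race_black': 0,
--         'race_hispanic_latinx': 0,
--         'race_native_american': 0,
--         'race_white': 0
--     }
--
--     filtrados = [linha for linha in dados_sem_cabecalho if linha[1].isdigit() and int(linha[1]) == ano]
--
--     for linha in filtrados:
--         total_funcionarios['race_asian'] += int(linha[3]) if linha[3].isdigit() else 0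
--         total_funcionarios['race_black'] += int(linha[4]) if linha[4].isdigit() else 0
--         total_funcionarios['race_hispanic_latinx'] += int(linha[5]) if linha[5].isdigit() else 0
--         total_funcionarios['race_native_american'] += int(linha[6]) if linha[6] and linha[6].isdigit() else 0
--         total_funcionarios['race_white'] += int(linha[7]) if linha[7].isdigit() else 0
--
--     return total_funcionarios
-- ===== SOURCE B (Python) =====
-- def calcular_total_funcionarios(dados, ano):
--     filtrados = [linha for linha in dados[1:]
--                  if linha[1].isdigit() and int(linha[1]) == ano]
--     colunas = {
--         'race_asian': 3,
--         'race_black': 4,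
--         'race_hispanic_latinx': 5,
--         'race_native_american': 6,
--         'race_white': 7
--     }
--     return {chave: sum(int(linha[col]) for linha in filtrados if linha[col].isdigit())
--             for chave, col in colunas.items()}
-- ===== Notes on version B (the rewrite author's own statement) =====
-- stated objective: simpler
-- what changed: Replaces the row-major loop that mutates a pre-initialised dict with a dict comprehension keyed by race name: one key->column-index table and five column-major generator sums over the filtered rows.
import Mathlib
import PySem

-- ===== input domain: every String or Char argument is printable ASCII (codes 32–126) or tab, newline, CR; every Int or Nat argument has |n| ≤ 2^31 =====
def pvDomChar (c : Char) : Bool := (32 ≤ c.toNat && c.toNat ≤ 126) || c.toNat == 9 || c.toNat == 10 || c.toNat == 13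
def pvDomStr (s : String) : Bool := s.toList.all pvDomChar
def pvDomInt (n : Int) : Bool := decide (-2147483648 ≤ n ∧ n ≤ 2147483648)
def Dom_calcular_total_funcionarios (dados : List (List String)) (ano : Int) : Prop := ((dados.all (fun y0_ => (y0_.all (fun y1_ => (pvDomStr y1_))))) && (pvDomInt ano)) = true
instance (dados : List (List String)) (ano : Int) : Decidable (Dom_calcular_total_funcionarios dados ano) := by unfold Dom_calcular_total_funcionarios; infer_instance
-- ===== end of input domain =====

-- B replaces A's row-major loop mutating a pre-initialised dict by a dict comprehension
-- keyed by race name, each value a column-major sum over the filtered rows (objective: simpler).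

-- ===== PORT A =====
-- Python "linha[1].isdigit() and int(linha[1]) == ano" (both Pythons use this exact expression;
-- int() is exact here because it is guarded by isdigit on ASCII strings)
def pvLinhaMatches (linha : List String) (ano : Int) : Bool :=
  PySem.Str.strIsdigit (PySem.List.pyGetD linha 1 "") &&
    ((PySem.Int.ofStr? (PySem.List.pyGetD linha 1 "")).getD 0 == ano)

-- int(s), called only under an isdigit guard, where it is exact
def pvInt (s : String) : Int := (PySem.Int.ofStr? s).getD 0

def calcular_total_funcionarios (dados : List (List String)) (ano : Int) : List (String × Int) :=
  let dados_sem_cabecalho := PySem.List.slice dados (some 1) none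
  let total0 : PySem.Dict String Int := PySem.Dict.ofList
    [("race_asian", 0), ("race_black", 0), ("race_hispanic_latinx", 0),
     ("race_native_american", 0), ("race_white", 0)]
  let filtrados := dados_sem_cabecalho.filter (fun linha => pvLinhaMatches linha ano)
  let total := filtrados.foldl (fun t linha =>
    let t := t.modify "race_asian" 0
      (· + (if PySem.Str.strIsdigit (PySem.List.pyGetD linha 3 "") then pvInt (PySem.List.pyGetD linha 3 "") else 0))
    let t := t.modify "race_black" 0
      (· + (if PySem.Str.strIsdigit (PySem.List.pyGetD linha 4 "") then pvInt (PySem.List.pyGetD linha 4 "") else 0))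
    let t := t.modify "race_hispanic_latinx" 0
      (· + (if PySem.Str.strIsdigit (PySem.List.pyGetD linha 5 "") then pvInt (PySem.List.pyGetD linha 5 "") else 0))
    let t := t.modify "race_native_american" 0
      (· + (if (!(PySem.List.pyGetD linha 6 "" == "")) && PySem.Str.strIsdigit (PySem.List.pyGetD linha 6 "") then pvInt (PySem.List.pyGetD linha 6 "") else 0))
    let t := t.modify "race_white" 0
      (· + (if PySem.Str.strIsdigit (PySem.List.pyGetD linha 7 "") then pvInt (PySem.List.pyGetD linha 7 "") else 0))
    t) total0
  total.items

-- ===== PORT B =====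
def calcular_total_funcionarios_alt (dados : List (List String)) (ano : Int) : List (String × Int) :=
  let filtrados := (PySem.List.slice dados (some 1) none).filter (fun linha => pvLinhaMatches linha ano)
  let colunas : List (String × Int) :=
    [("race_asian", 3), ("race_black", 4), ("race_hispanic_latinx", 5),
     ("race_native_american", 6), ("race_white", 7)]
  colunas.map (fun kc => (kc.1,
    ((filtrados.filter (fun linha => PySem.Str.strIsdigit (PySem.List.pyGetD linha kc.2 ""))).map
      (fun linha => pvInt (PySem.List.pyGetD linha kc.2 ""))).sum))

-- ===== PRECONDITION & SPEC =====
-- Pre_ excludes exactly the inputs where A raises IndexError: a data row (after the header)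
-- of length < 2, or a row passing the year filter of length < 8 (columns 3..7 are read).
def Pre_calcular_total_funcionarios (dados : List (List String)) (ano : Int) : Prop :=
  ∀ linha ∈ dados.drop 1, 2 ≤ linha.length ∧
    (pvLinhaMatches linha ano = true → 8 ≤ linha.length)
instance (dados : List (List String)) (ano : Int) : Decidable (Pre_calcular_total_funcionarios dados ano) := by unfold Pre_calcular_total_funcionarios; infer_instance

def pvWitness_calcular_total_funcionarios : List (List String) × Int :=
  ([["header", "year", "c", "a", "b", "h", "n", "w"],
    ["x", "2020", "c", "3", "4", "5", "", "7"],
    ["y", "1999", "c", "1", "1", "1", "1", "1"]], 2020)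

def Spec_calcular_total_funcionarios (dados : List (List String)) (ano : Int) (out : List (String × Int)) : Prop := out = calcular_total_funcionarios_alt dados ano
instance (dados : List (List String)) (ano : Int) (out : List (String × Int)) : Decidable (Spec_calcular_total_funcionarios dados ano out) := by unfold Spec_calcular_total_funcionarios; infer_instance

-- ===== CLAIM (what is proved, stated in full; the proofs are below) =====
def Claim_equal_calcular_total_funcionarios : Prop := ∀ (dados : List (List String)) (ano : Int), Dom_calcular_total_funcionarios dados ano → Pre_calcular_total_funcionarios dados ano → Spec_calcular_total_funcionarios dados ano (calcular_total_funcionarios dados ano)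

-- ===== LEMMAS AND PROOFS =====

-- per-row contribution of column c, as A computes it
def pvContrib (c : Int) (linha : List String) : Int :=
  if PySem.Str.strIsdigit (PySem.List.pyGetD linha c "") then pvInt (PySem.List.pyGetD linha c "") else 0

-- B's filtered-generator sum equals the sum of A's per-row contributions
theorem pv_sumB (c : Int) (F : List (List String)) :
    ((F.filter (fun linha => PySem.Str.strIsdigit (PySem.List.pyGetD linha c ""))).map
      (fun linha => pvInt (PySem.List.pyGetD linha c ""))).sum = (F.map (pvContrib c)).sum := by
  induction F with
  | nil => rfl
  | cons x xs ih =>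
    simp only [PySem.Str.strIsdigit_eq] at ih
    by_cases h : PySem.Chars.strIsdigit (PySem.List.pyGetD x c "").toList = true <;>
      simp [pvContrib, h, ih]

-- the extra truthiness test on linha[6] is redundant: "".isdigit() is False
theorem pv_native (s : String) :
    ((!(s == "")) && PySem.Str.strIsdigit s) = PySem.Str.strIsdigit s := by
  by_cases h : s = ""
  · subst h; decide
  · simp [h]

-- one loop iteration on the five-key dict, characterised
theorem pv_step (x : List String) (a b c d e : Int) :
    (((((PySem.Dict.mk [("race_asian", a), ("race_black", b), ("race_hispanic_latinx", c),
        ("race_native_american", d), ("race_white", e)]).modify "race_asian" 0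
        (· + (if PySem.Str.strIsdigit (PySem.List.pyGetD x 3 "") then pvInt (PySem.List.pyGetD x 3 "") else 0))).modify "race_black" 0
        (· + (if PySem.Str.strIsdigit (PySem.List.pyGetD x 4 "") then pvInt (PySem.List.pyGetD x 4 "") else 0))).modify "race_hispanic_latinx" 0
        (· + (if PySem.Str.strIsdigit (PySem.List.pyGetD x 5 "") then pvInt (PySem.List.pyGetD x 5 "") else 0))).modify "race_native_american" 0
        (· + (if (!(PySem.List.pyGetD x 6 "" == "")) && PySem.Str.strIsdigit (PySem.List.pyGetD x 6 "") then pvInt (PySem.List.pyGetD x 6 "") else 0))).modify "race_white" 0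
        (· + (if PySem.Str.strIsdigit (PySem.List.pyGetD x 7 "") then pvInt (PySem.List.pyGetD x 7 "") else 0)) =
    PySem.Dict.mk [("race_asian", a + pvContrib 3 x), ("race_black", b + pvContrib 4 x),
      ("race_hispanic_latinx", c + pvContrib 5 x), ("race_native_american", d + pvContrib 6 x),
      ("race_white", e + pvContrib 7 x)] := by
  rw [pv_native]
  simp [PySem.Dict.modify, PySem.Dict.insert, PySem.Dict.getD, PySem.Dict.get?,
        PySem.Dict.contains, pvContrib]

-- A's accumulation loop, characterised: starting from the five-key dict it adds the five column sums
theorem pv_foldA (F : List (List String)) (a b c d e : Int) :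
    (F.foldl (fun t linha =>
      let t := t.modify "race_asian" 0
        (· + (if PySem.Str.strIsdigit (PySem.List.pyGetD linha 3 "") then pvInt (PySem.List.pyGetD linha 3 "") else 0))
      let t := t.modify "race_black" 0
        (· + (if PySem.Str.strIsdigit (PySem.List.pyGetD linha 4 "") then pvInt (PySem.List.pyGetD linha 4 "") else 0))
      let t := t.modify "race_hispanic_latinx" 0
        (· + (if PySem.Str.strIsdigit (PySem.List.pyGetD linha 5 "") then pvInt (PySem.List.pyGetD linha 5 "") else 0))
      let t := t.modify "race_native_american" 0
        (· + (if (!(PySem.List.pyGetD linha 6 "" == "")) && PySem.Str.strIsdigit (PySem.List.pyGetD linha 6 "") then pvInt (PySem.List.pyGetD linha 6 "") else 0))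
      let t := t.modify "race_white" 0
        (· + (if PySem.Str.strIsdigit (PySem.List.pyGetD linha 7 "") then pvInt (PySem.List.pyGetD linha 7 "") else 0))
      t)
      (PySem.Dict.mk [("race_asian", a), ("race_black", b), ("race_hispanic_latinx", c),
        ("race_native_american", d), ("race_white", e)])).items =
    [("race_asian", a + (F.map (pvContrib 3)).sum),
     ("race_black", b + (F.map (pvContrib 4)).sum),
     ("race_hispanic_latinx", c + (F.map (pvContrib 5)).sum),
     ("race_native_american", d + (F.map (pvContrib 6)).sum),
     ("race_white", e + (F.map (pvContrib 7)).sum)] := by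
  induction F generalizing a b c d e with
  | nil => simp
  | cons x xs ih =>
    simp only [List.foldl_cons, pv_step, ih, List.map_cons, List.sum_cons]
    simp [add_assoc]

theorem calcular_total_funcionarios_spec : Claim_equal_calcular_total_funcionarios := by
  intro dados ano _ _
  unfold Spec_calcular_total_funcionarios calcular_total_funcionarios calcular_total_funcionarios_alt
  have h0 : (PySem.Dict.ofList [("race_asian", (0:Int)), ("race_black", 0), ("race_hispanic_latinx", 0),
      ("race_native_american", 0), ("race_white", 0)]) =
      PySem.Dict.mk [("race_asian", (0:Int)), ("race_black", 0), ("race_hispanic_latinx", 0),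
      ("race_native_american", 0), ("race_white", 0)] := by decide
  simp only [h0, pv_foldA, List.map_cons, List.map_nil, pv_sumB, zero_add]
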